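-- pv_equiv track=rewrite | github.com/SonThanhNguyen13/web | control/views.py | check_username
-- ===== SOURCE A (Python) =====
-- import string
--
-- def check_username(username):
--     """
--     Check if username contain special characters
--     :param username: username
--     :return: boolean. If contain: False else True
--     """
--     special = list(string.punctuation)
--     special.append(' ')
--     for i in special:
--         if i in username:
--             return False
--     else:
--         return True
-- ===== SOURCE B (Python) =====
-- def check_username(username):
--     """
--     Check if username contain special characters
--     :param username: username
--     :return: boolean. If contain: False else True
--     """
--     # a character is "special" exactly when it is printable ASCII but not alphanumeric
--     # (string.punctuation + ' ' is precisely the printable ASCII non-alnum characters)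
--     return all(c.isalnum() or not (32 <= ord(c) <= 126) for c in username)
-- ===== Notes on version B (the rewrite author's own statement) =====
-- stated objective: alternative
-- what changed: Replaces the scan of the username once per punctuation character by a single pass that classifies each character arithmetically (special iff printable ASCII and not alphanumeric), removing the punctuation list entirely.
import Mathlib
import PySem

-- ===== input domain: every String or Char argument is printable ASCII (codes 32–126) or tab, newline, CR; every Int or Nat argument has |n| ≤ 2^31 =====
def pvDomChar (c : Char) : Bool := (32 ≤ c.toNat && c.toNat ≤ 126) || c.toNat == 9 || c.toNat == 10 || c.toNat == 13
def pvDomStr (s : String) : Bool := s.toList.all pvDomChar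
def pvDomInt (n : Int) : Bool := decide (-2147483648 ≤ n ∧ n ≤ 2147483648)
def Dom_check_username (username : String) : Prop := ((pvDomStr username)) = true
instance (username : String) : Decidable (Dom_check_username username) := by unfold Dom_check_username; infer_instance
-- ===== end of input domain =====

-- B drops the punctuation list entirely: one pass classifying each character arithmetically
-- (special iff printable ASCII and not alphanumeric); same result, different algorithm.

-- ===== PORT A =====
-- string.punctuation followed by ' ' (the order A builds its list in)
def pvSpecials : List Char :=
  ['!', '"', '#', '$', '%', '&', '\'', '(', ')', '*', '+', ',', '-', '.', '/',
   ':', ';', '<', '=', '>', '?', '@', '[', '\\', ']', '^', '_', '`', '{', '|', '}', '~', ' ']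

-- A's loop over the special characters with early return False.
-- Each special is a single character, so Python's substring test `i in username`
-- is exactly char membership in the username's characters.
def pvLoopA (specials : List Char) (u : List Char) : Bool :=
  match specials with
  | [] => true
  | c :: rest => if u.contains c then false else pvLoopA rest u

def check_username (username : String) : Bool :=
  pvLoopA pvSpecials username.toList

-- ===== PORT B =====
-- all(c.isalnum() or not (32 <= ord(c) <= 126) for c in username); Chars.isalnum is
-- Python's c.isalnum(), exact on this ASCII domain.
def check_username_alt (username : String) : Bool :=
  username.toList.all
    (fun c => PySem.Chars.isalnum c || !(decide (32 ≤ c.toNat) && decide (c.toNat ≤ 126)))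

-- ===== PRECONDITION & SPEC =====
def Spec_check_username (username : String) (out : Bool) : Prop := out = check_username_alt username
instance (username : String) (out : Bool) : Decidable (Spec_check_username username out) := by unfold Spec_check_username; infer_instance

-- ===== CLAIM (what is proved, stated in full; the proofs are below) =====
def Claim_equal_check_username : Prop := ∀ (username : String), Dom_check_username username → Spec_check_username username (check_username username)

-- ===== LEMMAS AND PROOFS =====

theorem pvLoopA_eq_any (specials u : List Char) :
    pvLoopA specials u = !(specials.any (fun c => u.contains c)) := by
  induction specials with
  | nil => rfl
  | cons c rest ih =>
    simp only [pvLoopA, List.any_cons]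
    by_cases h : u.contains c = true <;> simp [ih]

theorem any_contains_comm (xs ys : List Char) :
    (xs.any (fun c => ys.contains c)) = (ys.any (fun c => xs.contains c)) := by
  rw [Bool.eq_iff_iff]
  simp only [List.any_eq_true, List.contains_eq_mem, decide_eq_true_eq]
  exact ⟨fun ⟨c, h1, h2⟩ => ⟨c, h2, h1⟩, fun ⟨c, h1, h2⟩ => ⟨c, h2, h1⟩⟩

-- pointwise: membership in the punctuation+space list IS "printable ASCII and not alnum"
theorem specials_contains_eq (c : Char) :
    pvSpecials.contains c
      = !(PySem.Chars.isalnum c || !(decide (32 ≤ c.toNat) && decide (c.toNat ≤ 126))) := by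
  rw [Bool.eq_iff_iff]
  simp only [pvSpecials, List.contains_eq_mem, decide_eq_true_eq, List.mem_cons,
    List.not_mem_nil, or_false, PySem.Chars.isalnum, PySem.Chars.isalpha,
    PySem.Chars.isdigit, PySem.Chars.isupper, PySem.Chars.islower,
    Char.le_def, Char.ext_iff, UInt32.le_iff_toNat_le, ← UInt32.toNat_inj,
    Bool.not_eq_true', Bool.and_eq_true, Bool.and_eq_false_iff, Bool.or_eq_false_iff,
    Bool.not_eq_false', decide_eq_false_iff_not, not_le, decide_eq_true_eq,
    Char.toNat, Char.reduceVal, UInt32.reduceToNat]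
  omega

theorem check_username_spec : Claim_equal_check_username := by
  intro username _
  unfold Spec_check_username check_username check_username_alt
  rw [pvLoopA_eq_any, any_contains_comm]
  simp only [List.any_eq_not_all_not, Bool.not_not]
  congr 1
  funext c
  rw [specials_contains_eq, Bool.not_not]
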